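-- pv_equiv track=rewrite | github.com/kmayerb/tcrshuffler | tcrshuffler/utils.py | label_cdr3_germline_vj_regions
-- ===== SOURCE A (Python) =====
-- def label_cdr3_germline_vj_regions(cdr3, germline_v, germline_j):
--     """
--     Label regions of the CDR3 sequence as V, J, or N depending on germline matches.
--
--     Parameters
--     ----------
--     cdr3 : str
--         The full CDR3 amino acid sequence.
--     germline_v : str
--         The germline V region amino acid string aligned to the start of the CDR3.
--     germline_j : str
--         The germline J region amino acid string aligned to the end of the CDR3.
--
--     Returns
--     -------
--     str
--         A string of same length as cdr3 with characters:
--         - 'V' where cdr3 matches germline_v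
--         - 'J' where cdr3 matches germline_j
--         - 'N' otherwise (non-templated nucleotide additions)
--     """
--     labels = list('N' * len(cdr3))
--
--     # Match from left with germline_v
--     for i, aa in enumerate(germline_v):
--         if i >= len(cdr3):
--             break
--         if aa == cdr3[i]:
--             labels[i] = 'V'
--
--     # Match from right with germline_j
--     for j, aa in enumerate(reversed(germline_j)):
--         if j >= len(cdr3):
--             break
--         if aa == cdr3[-(j+1)]:
--             if labels[-(j+1)] == 'N':  # don't overwrite V matches
--                 labels[-(j+1)] = 'J'
--
--     return ''.join(labels)
-- ===== SOURCE B (Python) =====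
-- def label_cdr3_germline_vj_regions(cdr3, germline_v, germline_j):
--     """Single pass: each position's label computed independently by index arithmetic."""
--     n = len(cdr3)
--     off = n - len(germline_j)
--     return ''.join(
--         'V' if i < len(germline_v) and germline_v[i] == cdr3[i]
--         else 'J' if i >= off and germline_j[i - off] == cdr3[i]
--         else 'N'
--         for i in range(n)
--     )
-- ===== Notes on version B (the rewrite author's own statement) =====
-- stated objective: simpler
-- what changed: Replaced the two mutating passes (left V-scan, reversed right J-scan with an overwrite guard over a mutable list) by a single comprehension that computes each position's label independently via closed-form index arithmetic, V-over-J precedence encoded by if/elif order.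
import Mathlib
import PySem

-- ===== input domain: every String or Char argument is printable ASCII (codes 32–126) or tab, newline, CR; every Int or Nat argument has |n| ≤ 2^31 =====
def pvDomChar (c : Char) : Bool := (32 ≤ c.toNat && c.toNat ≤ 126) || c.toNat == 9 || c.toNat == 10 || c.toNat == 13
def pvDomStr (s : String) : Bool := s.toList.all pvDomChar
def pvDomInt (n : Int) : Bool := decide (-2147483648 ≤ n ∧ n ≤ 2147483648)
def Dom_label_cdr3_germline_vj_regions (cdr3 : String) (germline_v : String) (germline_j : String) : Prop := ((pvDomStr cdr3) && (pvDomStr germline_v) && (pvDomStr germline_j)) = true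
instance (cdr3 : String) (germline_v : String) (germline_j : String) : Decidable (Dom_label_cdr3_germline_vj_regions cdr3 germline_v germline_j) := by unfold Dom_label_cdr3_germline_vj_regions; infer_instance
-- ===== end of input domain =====

-- B replaces A's two mutating passes over a label list by one independent closed-form label per position (objective: simpler).

-- ===== PORT A =====
-- 'for i, aa in enumerate(germline_v): if i >= len(cdr3): break; if aa == cdr3[i]: labels[i] = "V"'
def pvLoopV (cdr3 : List Char) (i : Nat) (labels : List Char) : List Char → List Char
  | [] => labels
  | aa :: rest =>
    if cdr3.length ≤ i then labels
    else
      -- cdr3[i] with 0 ≤ i < len(cdr3): getD is exact here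
      let labels' := if aa = cdr3.getD i ' ' then labels.set i 'V' else labels
      pvLoopV cdr3 (i + 1) labels' rest

-- 'for j, aa in enumerate(reversed(germline_j)): if j >= len(cdr3): break; …'
def pvLoopJ (cdr3 : List Char) (j : Nat) (labels : List Char) : List Char → List Char
  | [] => labels
  | aa :: rest =>
    if cdr3.length ≤ j then labels
    else
      -- cdr3[-(j+1)] / labels[-(j+1)]: since j < len(cdr3) = len(labels), the negative
      -- index -(j+1) denotes position len(cdr3)-1-j; this hand-port is exact on that range
      let idx := cdr3.length - 1 - j
      let labels' :=
        if aa = cdr3.getD idx ' ' ∧ labels.getD idx ' ' = 'N' then labels.set idx 'J'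
        else labels
      pvLoopJ cdr3 (j + 1) labels' rest

def label_cdr3_germline_vj_regions (cdr3 : String) (germline_v : String) (germline_j : String) : String :=
  -- labels = list('N'*len(cdr3)); V pass; J pass over reversed(germline_j); ''.join(labels)
  String.ofList
    (pvLoopJ cdr3.toList 0
      (pvLoopV cdr3.toList 0 (List.replicate cdr3.toList.length 'N') germline_v.toList)
      germline_j.toList.reverse)

-- ===== PORT B =====
def pvLabelAt (cdr3 v j : List Char) (i : Nat) : Char :=
  let off : Int := (cdr3.length : Int) - j.length
  if i < v.length ∧ v.getD i ' ' = cdr3.getD i ' ' then 'V'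
  -- germline_j[i - off]: under the guard off ≤ i the index i - off is ≥ 0 and < len(germline_j), so toNat/getD are exact
  else if off ≤ (i : Int) ∧ j.getD ((i : Int) - off).toNat ' ' = cdr3.getD i ' ' then 'J'
  else 'N'

def label_cdr3_germline_vj_regions_alt (cdr3 : String) (germline_v : String) (germline_j : String) : String :=
  String.ofList ((List.range cdr3.toList.length).map
    (pvLabelAt cdr3.toList germline_v.toList germline_j.toList))

-- ===== PRECONDITION & SPEC =====
def Spec_label_cdr3_germline_vj_regions (cdr3 : String) (germline_v : String) (germline_j : String) (out : String) : Prop := out = label_cdr3_germline_vj_regions_alt cdr3 germline_v germline_j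
instance (cdr3 : String) (germline_v : String) (germline_j : String) (out : String) : Decidable (Spec_label_cdr3_germline_vj_regions cdr3 germline_v germline_j out) := by unfold Spec_label_cdr3_germline_vj_regions; infer_instance

-- ===== CLAIM (what is proved, stated in full; the proofs are below) =====
def Claim_equal_label_cdr3_germline_vj_regions : Prop := ∀ (cdr3 : String) (germline_v : String) (germline_j : String), Dom_label_cdr3_germline_vj_regions cdr3 germline_v germline_j → Spec_label_cdr3_germline_vj_regions cdr3 germline_v germline_j (label_cdr3_germline_vj_regions cdr3 germline_v germline_j)

-- ===== LEMMAS AND PROOFS =====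

theorem pvLoopV_length (c : List Char) (v : List Char) : ∀ (i : Nat) (ls : List Char),
    (pvLoopV c i ls v).length = ls.length := by
  induction v with
  | nil => intro i ls; simp [pvLoopV]
  | cons aa rest ih =>
    intro i ls
    simp only [pvLoopV]
    split
    · rfl
    · rw [ih]
      split <;> simp

theorem pvLoopJ_length (c : List Char) (v : List Char) : ∀ (j : Nat) (ls : List Char),
    (pvLoopJ c j ls v).length = ls.length := by
  induction v with
  | nil => intro j ls; simp [pvLoopJ]
  | cons aa rest ih =>
    intro j ls
    simp only [pvLoopJ]
    split
    · rfl
    · rw [ih]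
      split <;> simp

theorem pvLoopV_getD (c : List Char) (v : List Char) : ∀ (i : Nat) (ls : List Char),
    ls.length = c.length → ∀ k, k < c.length →
    (pvLoopV c i ls v).getD k ' ' =
      if i ≤ k ∧ k - i < v.length ∧ v.getD (k - i) ' ' = c.getD k ' ' then 'V'
      else ls.getD k ' ' := by
  induction v with
  | nil =>
    intro i ls hl k hk
    simp [pvLoopV]
  | cons aa rest ih =>
    intro i ls hl k hk
    simp only [pvLoopV]
    split
    · rename_i hbrk
      split
      · rename_i hcond; omega
      · rfl
    · rename_i hbrk
      have hbrk' : i < c.length := by omega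
      have hset : (if aa = c.getD i ' ' then ls.set i 'V' else ls).length = c.length := by
        split <;> simp [hl]
      rw [ih (i+1) _ hset k hk]
      by_cases hki : k = i
      · subst hki
        have h1 : ¬ (k + 1 ≤ k ∧ k - (k+1) < rest.length ∧ rest.getD (k - (k+1)) ' ' = c.getD k ' ') := by
          omega
        rw [if_neg h1]
        have h2 : (aa :: rest).getD (k - k) ' ' = aa := by simp
        by_cases hm : aa = c.getD k ' '
        · have hcond : k ≤ k ∧ k - k < (aa :: rest).length ∧ (aa :: rest).getD (k - k) ' ' = c.getD k ' ' := by
            refine ⟨le_refl k, by simp, by rw [h2]; exact hm⟩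
          rw [if_pos hm, if_pos hcond]
          have hkl : k < ls.length := by omega
          simp [List.getD, hkl]
        · have hcond : ¬ (k ≤ k ∧ k - k < (aa :: rest).length ∧ (aa :: rest).getD (k - k) ' ' = c.getD k ' ') := by
            intro h; exact hm (by rw [← h2]; exact h.2.2)
          rw [if_neg hm, if_neg hcond]
      · have hls : (if aa = c.getD i ' ' then ls.set i 'V' else ls).getD k ' ' = ls.getD k ' ' := by
          split
          · simp [List.getD, List.getElem?_set_ne (by omega : i ≠ k)]
          · rfl
        rw [hls]
        by_cases hik : i + 1 ≤ k
        · have harith : k - i = (k - (i+1)) + 1 := by omega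
          have h4 : (aa :: rest).getD (k - i) ' ' = rest.getD (k - (i+1)) ' ' := by
            rw [harith]; simp
          by_cases hr : k - (i+1) < rest.length ∧ rest.getD (k - (i+1)) ' ' = c.getD k ' '
          · rw [if_pos ⟨hik, hr⟩]
            have hcond : i ≤ k ∧ k - i < (aa :: rest).length ∧ (aa :: rest).getD (k - i) ' ' = c.getD k ' ' := by
              refine ⟨by omega, ?_, by rw [h4]; exact hr.2⟩
              have h5 := hr.1
              simp only [List.length_cons]
              omega
            rw [if_pos hcond]
          · rw [if_neg (by intro h; exact hr ⟨h.2.1, h.2.2⟩)]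
            have hcond : ¬ (i ≤ k ∧ k - i < (aa :: rest).length ∧ (aa :: rest).getD (k - i) ' ' = c.getD k ' ') := by
              intro h
              refine hr ⟨?_, by rw [← h4]; exact h.2.2⟩
              have h5 := h.2.1
              simp only [List.length_cons] at h5
              omega
            rw [if_neg hcond]
        · rw [if_neg (by omega), if_neg (by omega)]

theorem pvLoopJ_getD (c : List Char) (v : List Char) : ∀ (j : Nat) (ls : List Char),
    ls.length = c.length → ∀ k, k < c.length →
    (pvLoopJ c j ls v).getD k ' ' =
      if j ≤ c.length - 1 - k ∧ (c.length - 1 - k) - j < v.length ∧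
         v.getD ((c.length - 1 - k) - j) ' ' = c.getD k ' ' ∧ ls.getD k ' ' = 'N' then 'J'
      else ls.getD k ' ' := by
  induction v with
  | nil =>
    intro j ls hl k hk
    simp [pvLoopJ]
  | cons aa rest ih =>
    intro j ls hl k hk
    simp only [pvLoopJ]
    split
    · rename_i hbrk
      split
      · rename_i hcond; omega
      · rfl
    · rename_i hbrk
      have hbrk' : j < c.length := by omega
      set idx := c.length - 1 - j with hidx
      set ls' := if aa = c.getD idx ' ' ∧ ls.getD idx ' ' = 'N' then ls.set idx 'J' else ls with hls'
      have hset : ls'.length = c.length := by rw [hls']; split <;> simp [hl]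
      rw [ih (j+1) _ hset k hk]
      set t := c.length - 1 - k with ht
      by_cases hki : k = idx
      · have hjk : t = j := by omega
        have h1 : ¬ (j + 1 ≤ t ∧ t - (j+1) < rest.length ∧
            rest.getD (t - (j+1)) ' ' = c.getD k ' ' ∧ ls'.getD k ' ' = 'N') := by
          rw [hjk]; omega
        rw [if_neg h1]
        have h2 : (aa :: rest).getD (t - j) ' ' = aa := by rw [hjk]; simp
        by_cases hm : aa = c.getD k ' ' ∧ ls.getD k ' ' = 'N'
        · have hcond : j ≤ t ∧ t - j < (aa :: rest).length ∧
              (aa :: rest).getD (t - j) ' ' = c.getD k ' ' ∧ ls.getD k ' ' = 'N' := by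
            refine ⟨by omega, by simp [hjk], by rw [h2]; exact hm.1, hm.2⟩
          rw [if_pos hcond]
          have hmem : aa = c.getD idx ' ' ∧ ls.getD idx ' ' = 'N' := by rw [← hki]; exact hm
          rw [hls', if_pos hmem, ← hki]
          have hkl : k < ls.length := by omega
          simp [List.getD, hkl]
        · have hcond : ¬ (j ≤ t ∧ t - j < (aa :: rest).length ∧
              (aa :: rest).getD (t - j) ' ' = c.getD k ' ' ∧ ls.getD k ' ' = 'N') := by
            intro h; exact hm ⟨by rw [← h2]; exact h.2.2.1, h.2.2.2⟩
          rw [if_neg hcond]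
          rw [hls']
          split
          · rename_i hcc
            exact absurd (by rw [hki]; exact hcc) hm
          · rfl
      · have hne : ls'.getD k ' ' = ls.getD k ' ' := by
          rw [hls']
          split
          · simp [List.getD, List.getElem?_set_ne (by omega : idx ≠ k)]
          · rfl
        rw [hne]
        have htj : t ≠ j := by omega
        by_cases hjt : j + 1 ≤ t
        · have harith : t - j = (t - (j+1)) + 1 := by omega
          have h4 : (aa :: rest).getD (t - j) ' ' = rest.getD (t - (j+1)) ' ' := by
            rw [harith]; simp
          by_cases hr : t - (j+1) < rest.length ∧ rest.getD (t - (j+1)) ' ' = c.getD k ' ' ∧ ls.getD k ' ' = 'N'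
          · rw [if_pos ⟨hjt, hr⟩]
            have hcond : j ≤ t ∧ t - j < (aa :: rest).length ∧
                (aa :: rest).getD (t - j) ' ' = c.getD k ' ' ∧ ls.getD k ' ' = 'N' := by
              refine ⟨by omega, ?_, by rw [h4]; exact hr.2.1, hr.2.2⟩
              have h5 := hr.1
              simp only [List.length_cons]
              omega
            rw [if_pos hcond]
          · rw [if_neg (by intro h; exact hr h.2)]
            have hcond : ¬ (j ≤ t ∧ t - j < (aa :: rest).length ∧
                (aa :: rest).getD (t - j) ' ' = c.getD k ' ' ∧ ls.getD k ' ' = 'N') := by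
              intro h
              refine hr ⟨?_, by rw [← h4]; exact h.2.2.1, h.2.2.2⟩
              have h5 := h.2.1
              simp only [List.length_cons] at h5
              omega
            rw [if_neg hcond]
        · rw [if_neg (by omega), if_neg (by omega)]

theorem getD_reverse (l : List Char) (t : Nat) (ht : t < l.length) :
    l.reverse.getD t ' ' = l.getD (l.length - 1 - t) ' ' := by
  have h1 : t < l.reverse.length := by simpa using ht
  have h2 : l.length - 1 - t < l.length := by omega
  rw [List.getD_eq_getElem _ _ h1, List.getD_eq_getElem _ _ h2]
  rw [List.getElem_reverse]

theorem label_pointwise (c v j : List Char) (k : Nat) (hk : k < c.length) :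
    (pvLoopJ c 0 (pvLoopV c 0 (List.replicate c.length 'N') v) j.reverse).getD k ' ' =
      pvLabelAt c v j k := by
  have hl1 : (pvLoopV c 0 (List.replicate c.length 'N') v).length = c.length := by
    rw [pvLoopV_length]; simp
  rw [pvLoopJ_getD c j.reverse 0 _ hl1 k hk]
  rw [pvLoopV_getD c v 0 _ (by simp) k hk]
  have hrepl : (List.replicate c.length 'N').getD k ' ' = 'N' := by
    rw [List.getD_eq_getElem _ _ (by simpa using hk)]; simp
  rw [hrepl]
  simp only [Nat.sub_zero, Nat.zero_le, true_and, List.length_reverse]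
  set t := c.length - 1 - k with ht
  simp only [pvLabelAt]
  by_cases hV : k < v.length ∧ v.getD k ' ' = c.getD k ' '
  · rw [if_pos hV]
    rw [if_neg (show ¬ (t < j.length ∧ j.reverse.getD t ' ' = c.getD k ' ' ∧ 'V' = 'N') from by
      intro h
      exact absurd h.2.2 (by decide))]
    rw [if_pos hV]
  · rw [if_neg hV]
    by_cases hJ : t < j.length ∧ j.reverse.getD t ' ' = c.getD k ' '
    · rw [if_pos ⟨hJ.1, hJ.2, rfl⟩]
      have hidx2 : (((k : Int) - ((c.length : Int) - (j.length : Int))).toNat) = j.length - 1 - t := by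
        omega
      have hcond : (c.length : Int) - (j.length : Int) ≤ (k : Int) ∧
          j.getD (((k : Int) - ((c.length : Int) - (j.length : Int))).toNat) ' ' = c.getD k ' ' := by
        refine ⟨by omega, ?_⟩
        rw [hidx2, ← getD_reverse j t hJ.1]
        exact hJ.2
      rw [if_pos hcond, if_neg hV]
    · rw [if_neg (show ¬ (t < j.length ∧ j.reverse.getD t ' ' = c.getD k ' ' ∧ 'N' = 'N') from by
        intro h; exact hJ ⟨h.1, h.2.1⟩)]
      rw [if_neg (show ¬ ((c.length : Int) - (j.length : Int) ≤ (k : Int) ∧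
          j.getD (((k : Int) - ((c.length : Int) - (j.length : Int))).toNat) ' ' = c.getD k ' ') from by
        intro h
        have h1 : t < j.length := by omega
        refine hJ ⟨h1, ?_⟩
        have hidx2 : (((k : Int) - ((c.length : Int) - (j.length : Int))).toNat) = j.length - 1 - t := by
          omega
        rw [getD_reverse j t h1, ← hidx2]
        exact h.2)]
      rw [if_neg hV]

-- ===== VERDICT (by name: the statement is the Claim_ definition above) =====
theorem label_cdr3_germline_vj_regions_spec : Claim_equal_label_cdr3_germline_vj_regions := by
  intro cdr3 germline_v germline_j _
  unfold Spec_label_cdr3_germline_vj_regions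
  unfold label_cdr3_germline_vj_regions label_cdr3_germline_vj_regions_alt
  refine congrArg String.ofList ?_
  have hlenA : (pvLoopJ cdr3.toList 0
      (pvLoopV cdr3.toList 0 (List.replicate cdr3.toList.length 'N') germline_v.toList)
      germline_j.toList.reverse).length = cdr3.toList.length := by
    rw [pvLoopJ_length, pvLoopV_length]
    exact List.length_replicate
  apply List.ext_getElem
  · rw [hlenA, List.length_map, List.length_range]
  · intro k h1 h2
    have hk : k < cdr3.toList.length := by rw [← hlenA]; exact h1
    have hpt := label_pointwise cdr3.toList germline_v.toList germline_j.toList k hk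
    rw [List.getD_eq_getElem _ _ h1] at hpt
    rw [hpt]
    rw [List.getElem_map]
    congr 1
    exact (List.getElem_range _).symm
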